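/-
  THE MODEL OF jsmn NEVER LEAVES ITS TOKEN ARRAY: every function of Json/Jsmn/Model.lean keeps the invariant `Inv` (Json/Jsmn/Inv.lean),
  for all four configurations. The result is `safeFacts : SafeFacts cfg`, the list of facts the machine-level proofs take as hypotheses.

  Part 1 (Json/Jsmn/SafeSub.lean): `init_inv`, `alloc_inv`, `prim_inv`, `str_inv`, `bump_inv`. Here: the body of jsmn_parse's loop, case by
  case (`openBracket_ok`, `closeScan_ok`, `closeLinks_ok`, `closeBracket_ok`, `comma_ok`, `primitiveCase_ok`, `body_ok`), then `loop_inv` and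
  `parse_inv` by induction on the fuel. What a trip through the body must leave behind is the predicate `StepOk`.
-/
import Json.Jsmn.SafeSub

namespace Jsmn

/-! ### the body of jsmn_parse's loop -/

/-- An `int` value. -/
def IsI32 (x : Int) : Prop := -2147483648 ≤ x ∧ x < 2147483648

/-- What one trip through the body of the loop, started in state `s`, must leave behind: the invariant, `count` an `int`, counting mode
unchanged; and if it returns, an error code. -/
def StepOk (cfg : Config) (n : Nat) (s : St) : Step → Prop
  | .next s' => Inv cfg s'.p s'.toks n ∧ IsI32 s'.count ∧ (s'.toks = none ↔ s.toks = none)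
  | .ret r s' => Inv cfg s'.p s'.toks n ∧ (r = JSMN_ERROR_NOMEM ∨ r = JSMN_ERROR_INVAL ∨ r = JSMN_ERROR_PART) ∧ (s'.toks = none ↔ s.toks = none)

/-- Going on with the state unchanged is fine. -/
theorem StepOk.self {cfg : Config} {n : Nat} {s : St} (h : Inv cfg s.p s.toks n) (hc : IsI32 s.count) : StepOk cfg n s (.next s) :=
  ⟨h, hc, Iff.rfl⟩

/-- **`case '{': case '[':`** -/
theorem openBracket_ok {cfg : Config} {n : Nat} {s : St} (c : UInt8) (h : Inv cfg s.p s.toks n) :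
    StepOk cfg n s (openBracket cfg c n s) := by
  obtain ⟨p, toks, count⟩ := s
  dsimp only at h
  unfold openBracket
  cases toks with
  | none => exact ⟨h, i32_range _, Iff.rfl⟩
  | some ts =>
    simp only
    cases ha : allocToken cfg p ts n with
    | none => exact ⟨h, Or.inl rfl, by simp⟩
    | some x =>
      obtain ⟨i, p1, ts1⟩ := x
      have hT := h.tok
      have ⟨hi, hin, htn, hpos, hsup, hT1, hlen⟩ := alloc_tok hT ha
      have hsm := hT.small
      have hp1 : p1.pos < 4294967296 := by rw [hpos]; exact h.pos
      -- the last two writes (`type`, `start`) and the new `toksuper`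
      have fin : ∀ tsX : Tokens, TokInv cfg p1 tsX n → ∀ ty : Nat,
          StepOk cfg n ⟨p, some ts, count⟩ (.next ⟨{ p1 with toksuper := i32 (p1.toknext - 1) },
            some (tsX.set i { tsX.getD i default with type := ty, start := i32 p1.pos }), i32 (count + 1)⟩) := by
        intro tsX hX ty
        refine ⟨Inv.ofTok ?_ hp1, i32_range _, by simp⟩
        have h2 : TokInv cfg p1 (tsX.set i { tsX.getD i default with type := ty, start := i32 p1.pos }) n := hX.set_same _ _ rfl
        have hi32 : i32 ((p1.toknext : Int) - 1) = i := by rw [htn]; unfold i32; omega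
        rw [hi32]
        exact h2.setSuper (i : Int) (by omega) (by rw [htn]; omega)
      simp only
      split
      · rename_i hne
        split
        · exact ⟨Inv.ofTok hT1 hp1, Or.inr (Or.inl rfl), by simp⟩
        · apply fin
          have h3 : TokInv cfg p1 (tokUpd ts1 p1.toksuper fun t => { t with size := i32 (t.size + 1) }) n :=
            hT1.upd _ _ (fun _ => rfl)
          split
          · rename_i hpl
            apply h3.set
            intro _
            have := hT.superHi
            rw [if_pos hpl] at this
            have := hT.superLo
            exact ⟨by rw [hsup]; omega, by simp only; rw [hsup]; omega⟩
          · exact h3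
      · exact fin _ hT1 _

/-- **`case '}': case ']':` without parent links** (the two backward scans). -/
theorem closeScan_ok {cfg : Config} {n : Nat} {s : St} {ts : Tokens} (type : Nat) (hts : s.toks = some ts)
    (h : Inv cfg s.p s.toks n) (hc : IsI32 s.count) : StepOk cfg n s (closeScan type s ts) := by
  obtain ⟨p, toks, count⟩ := s
  dsimp only at hts h hc; subst hts
  have hT := h.tok
  have hsm := hT.small
  have htn := hT.toknext
  unfold closeScan
  simp only
  have hi32 : i32 ((p.toknext : Int) - 1) = (p.toknext : Int) - 1 := i32_of_range (by omega) (by omega)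
  rw [hi32]
  split
  · exact StepOk.self h hc
  · split
    · exact ⟨h, Or.inr (Or.inl rfl), Iff.rfl⟩
    · rename_i j hj
      have hjlt := scanOpen_lt hj
      split
      · exact ⟨h, Or.inr (Or.inl rfl), Iff.rfl⟩
      · have h2 : TokInv cfg p (ts.set j { ts.getD j default with «end» := i32 (p.pos + 1) }) n := hT.set_same _ _ rfl
        split
        · exact ⟨Inv.ofTok (h2.setSuper _ (by omega) (by omega)) h.pos, hc, by simp⟩
        · rename_i k hk
          have hklt := scanOpen_lt hk
          exact ⟨Inv.ofTok (h2.setSuper _ (by omega) (by omega)) h.pos, hc, by simp⟩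

/-- **`case '}': case ']':` with parent links** (the walk up the parent links), from an allocated token `idx`. -/
theorem closeLinks_ok {cfg : Config} {n : Nat} {s : St} {ts : Tokens} (type : Nat) (hpl : cfg.parentLinks = true) (hts : s.toks = some ts)
    (h : Inv cfg s.p s.toks n) (hc : IsI32 s.count) (fuel : Nat) (idx : Int) (h0 : 0 ≤ idx) (h1 : idx < s.p.toknext) (st : Step)
    (hst : closeLinks type s ts fuel idx = some st) : StepOk cfg n s st := by
  obtain ⟨p, toks, count⟩ := s
  dsimp only at hts h hc h1; subst hts
  have hT := h.tok
  induction fuel generalizing idx with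
  | zero => simp [closeLinks] at hst
  | succ f ih =>
    rw [closeLinks] at hst
    simp only at hst
    have hlink := hT.links hpl idx.toNat (by omega)
    rw [← tokAt_nonneg h0] at hlink
    split at hst
    · split at hst
      · cases hst; exact ⟨h, Or.inr (Or.inl rfl), Iff.rfl⟩
      · cases hst
        have h2 : TokInv cfg p (tokUpd ts idx fun t => { t with «end» := i32 (p.pos + 1) }) n := hT.upd _ _ (fun _ => rfl)
        exact ⟨Inv.ofTok (h2.setSuper _ hlink.1 (by omega)) h.pos, hc, by simp⟩
    · split at hst
      · split at hst
        · cases hst; exact ⟨h, Or.inr (Or.inl rfl), Iff.rfl⟩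
        · cases hst; exact StepOk.self h hc
      · rename_i hne
        have hne' : (tokAt ts idx).parent ≠ -1 := by simpa using hne
        exact ih _ (by omega) (by omega) hst

/-- **`case '}': case ']':`** -/
theorem closeBracket_ok {cfg : Config} {n : Nat} {s : St} (c : UInt8) (h : Inv cfg s.p s.toks n) (hc : IsI32 s.count) (st : Step)
    (hst : closeBracket cfg c s = some st) : StepOk cfg n s st := by
  unfold closeBracket at hst
  split at hst
  · cases hst; exact StepOk.self h hc
  · rename_i ts hts
    simp only at hst
    split at hst
    · rename_i hpl
      split at hst
      · cases hst; exact ⟨h, Or.inr (Or.inl rfl), Iff.rfl⟩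
      · rename_i hge
        exact closeLinks_ok _ hpl hts h hc _ _ (by omega) (by omega) st hst
    · cases hst; exact closeScan_ok _ hts h hc

/-- **`case ',':`** -/
theorem comma_ok {cfg : Config} {n : Nat} {s : St} (h : Inv cfg s.p s.toks n) (hc : IsI32 s.count) : StepOk cfg n s (comma cfg s) := by
  obtain ⟨p, toks, count⟩ := s
  dsimp only at h hc
  unfold comma
  cases toks with
  | none => exact StepOk.self h hc
  | some ts =>
    have hT := h.tok
    have hsm := hT.small
    have htn := hT.toknext
    simp only
    split
    · rename_i hcond
      have hne : p.toksuper ≠ -1 := by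
        intro h'; simp [h'] at hcond
      split
      · rename_i hpl
        have hlo := hT.superLo
        have hhi := hT.superHi
        rw [if_pos hpl] at hhi
        have hlink := hT.links hpl p.toksuper.toNat (by omega)
        rw [← tokAt_nonneg (by omega)] at hlink
        exact ⟨Inv.ofTok (hT.setSuper _ hlink.1 (by omega)) h.pos, hc, by simp⟩
      · have hi32 : i32 ((p.toknext : Int) - 1) = (p.toknext : Int) - 1 := i32_of_range (by omega) (by omega)
        rw [hi32]
        split
        · exact StepOk.self h hc
        · split
          · exact StepOk.self h hc
          · rename_i j hj
            have hjlt := scanOpenContainer_lt hj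
            exact ⟨Inv.ofTok (hT.setSuper _ (by omega) (by omega)) h.pos, hc, by simp⟩
    · exact StepOk.self h hc

/-- What follows a call of jsmn_parse_primitive or jsmn_parse_string in jsmn_parse: return the error, or bump the superior token's size and
count one more. -/
theorem afterSub_ok {cfg : Config} {n : Nat} {s : St} {r : Int} {p' : Parser} {toks' : Option Tokens}
    (hres : Inv cfg p' toks' n ∧ p'.toksuper = s.p.toksuper ∧ IsSubResult r ∧ (toks' = none ↔ s.toks = none)) :
    StepOk cfg n s (if r < 0 then .ret r ⟨p', toks', s.count⟩ else .next ⟨p', bumpSuper p' toks', i32 (s.count + 1)⟩) := by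
  obtain ⟨a, _, c, d⟩ := hres
  split
  · rename_i hneg
    refine ⟨a, ?_, d⟩
    rcases c with c | c | c | c
    · omega
    · exact Or.inl c
    · exact Or.inr (Or.inl c)
    · exact Or.inr (Or.inr c)
  · exact ⟨bump_inv _ _ _ _ a, i32_range _, by simp only [bumpSuper_none_iff]; exact d⟩

/-- **The call of jsmn_parse_primitive** and what follows it. -/
theorem primitiveCase_ok {cfg : Config} {js : List UInt8} {fuel n : Nat} {s : St} (h : Inv cfg s.p s.toks n) (st : Step)
    (hst : primitiveCase cfg js fuel n s = some st) : StepOk cfg n s st := by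
  unfold primitiveCase at hst
  split at hst
  · cases hst
  · rename_i r p' toks' hp
    have hres := prim_inv cfg js fuel s.p s.toks n r p' toks' h hp
    have := afterSub_ok (s := s) hres
    split at hst <;> rename_i hr
    · rw [if_pos hr] at this; cases hst; exact this
    · rw [if_neg hr] at this; cases hst; exact this

/-- **One trip through the body of jsmn_parse's loop** keeps the invariant, whether it goes on or returns. -/
theorem body_ok {cfg : Config} {js : List UInt8} {fuel n : Nat} {s : St} (c : UInt8) (h : Inv cfg s.p s.toks n) (hc : IsI32 s.count)
    (st : Step) (hst : body cfg js fuel n s c = some st) : StepOk cfg n s st := by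
  unfold body at hst
  split at hst
  · cases hst; exact openBracket_ok c h
  split at hst
  · exact closeBracket_ok c h hc st hst
  split at hst
  · split at hst
    · cases hst
    · rename_i r p' toks' hp
      have hres := str_inv cfg js fuel s.p s.toks n r p' toks' h hp
      have := afterSub_ok (s := s) hres
      split at hst <;> rename_i hr
      · rw [if_pos hr] at this; cases hst; exact this
      · rw [if_neg hr] at this; cases hst; exact this
  split at hst
  · cases hst; exact StepOk.self h hc
  split at hst
  · cases hst
    refine ⟨?_, hc, Iff.rfl⟩
    obtain ⟨p, toks, count⟩ := s
    dsimp only at h hc ⊢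
    cases toks with
    | none => exact Inv.counting h.pos h.toknextR (i32_range _) h.numR
    | some ts =>
      have hT := h.tok
      have hsm := hT.small
      have htn := hT.toknext
      have hi32 : i32 ((p.toknext : Int) - 1) = (p.toknext : Int) - 1 := i32_of_range (by omega) (by omega)
      simp only [hi32]
      exact Inv.ofTok (hT.setSuper _ (by omega) (by omega)) h.pos
  split at hst
  · cases hst; exact comma_ok h hc
  split at hst
  · split at hst
    · simp only at hst
      split at hst
      · simp only [Bool.false_eq_true, if_false] at hst; exact primitiveCase_ok h st hst
      · split at hst
        · cases hst; exact ⟨h, Or.inr (Or.inl rfl), Iff.rfl⟩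
        · exact primitiveCase_ok h st hst
    · cases hst; exact ⟨h, Or.inr (Or.inl rfl), Iff.rfl⟩
  · exact primitiveCase_ok h st hst

/-! ### jsmn_parse -/

/-- The main loop keeps the invariant. -/
theorem loop_inv {cfg : Config} {js : List UInt8} {n : Nat} (fuel : Nat) (s : St) (h : Inv cfg s.p s.toks n) (hc : IsI32 s.count)
    (r : Int) (s' : St) (hl : loop cfg js n fuel s = some (r, s')) : Inv cfg s'.p s'.toks n ∧ (s'.toks = none ↔ s.toks = none) := by
  induction fuel generalizing s with
  | zero => simp [loop] at hl
  | succ f ih =>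
    rw [loop] at hl
    split at hl
    · split at hl
      · cases hl
      · rename_i r1 s1 hb
        cases hl
        have := body_ok _ h hc _ hb
        exact ⟨this.1, this.2.2⟩
      · rename_i s1 hb
        have ⟨a, b, c⟩ := body_ok _ h hc _ hb
        have := ih { s1 with p := { s1.p with pos := u32 (s1.p.pos + 1) } } (a.setPos _ (u32_lt _)) b hl
        exact ⟨this.1, this.2.trans c⟩
    · cases hl; exact ⟨h, Iff.rfl⟩

/-- **jsmn_parse** keeps the invariant. -/
theorem parse_inv (cfg : Config) (fuel : Nat) (js : List UInt8) (p : Parser) (toks : Option Tokens) (n : Nat) (r : Int) (p' : Parser)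
    (toks' : Option Tokens) (h : Inv cfg p toks n) (hp : parseFuel cfg fuel js p toks n = some (r, p', toks')) :
    Inv cfg p' toks' n ∧ (toks' = none ↔ toks = none) := by
  unfold parseFuel at hp
  cases hl : loop cfg js n fuel ⟨p, toks, i32 p.toknext⟩ with
  | none => simp [hl] at hp
  | some x =>
    obtain ⟨r1, s1⟩ := x
    simp only [hl, Option.map_some, Option.some.injEq, Prod.mk.injEq] at hp
    obtain ⟨rfl, rfl, rfl⟩ := hp
    exact loop_inv fuel ⟨p, toks, i32 p.toknext⟩ h (i32_range _) _ _ hl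

/-- **The facts about the model that the machine-level proofs take as hypotheses**, for every configuration. -/
theorem safeFacts (cfg : Config) : SafeFacts cfg where
  init := init_inv cfg
  alloc := fun p ts n i p' ts' => alloc_inv cfg p ts n i p' ts'
  prim := prim_inv cfg
  str := str_inv cfg
  bump := bump_inv cfg
  body := fun _ _ _ _ c h hc => ⟨fun _ hb => body_ok c h hc _ hb, fun _ _ hb => body_ok c h hc _ hb⟩
  parse := parse_inv cfg

end Jsmn
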